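-- pv_equiv track=rewrite | github.com/edwardkong/aoc | 2023/day07/solution.py | hand_to_hex_val
-- ===== SOURCE A (Python) =====
-- def hand_to_hex_val(hand: str, jokers=None) -> int:
--     hex_val = 0
--     for card in hand:
--         if card == 'T':
--             hex_val = 0xA | (hex_val << 4)
--         elif card == 'J':
--             if not jokers:
--                 hex_val = 0xB | (hex_val << 4)
--             else:
--                 hex_val = 0x1 | (hex_val << 4)
--         elif card == 'Q':
--             hex_val = 0xC | (hex_val << 4)
--         elif card == 'K':
--             hex_val = 0xD | (hex_val << 4)
--         elif card == 'A':
--             hex_val = 0xE | (hex_val << 4)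
--         else:
--             hex_val = int(card) | (hex_val << 4)
--     return hex_val
-- ===== SOURCE B (Python) =====
-- def hand_to_hex_val(hand: str, jokers=None) -> int:
--     vals = {'T': 10, 'J': 1 if jokers else 11, 'Q': 12, 'K': 13, 'A': 14}
--     return sum((vals[c] if c in vals else int(c)) * 16 ** i
--                for i, c in enumerate(reversed(hand)))
-- ===== Notes on version B (the rewrite author's own statement) =====
-- stated objective: alternative
-- what changed: Replaces the left-to-right Horner loop with bit-shift/bitwise-or accumulation and a five-way if/elif chain by a positional sum: a card-value dict plus sum of value * 16**i over enumerate(reversed(hand)).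
import Mathlib
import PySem

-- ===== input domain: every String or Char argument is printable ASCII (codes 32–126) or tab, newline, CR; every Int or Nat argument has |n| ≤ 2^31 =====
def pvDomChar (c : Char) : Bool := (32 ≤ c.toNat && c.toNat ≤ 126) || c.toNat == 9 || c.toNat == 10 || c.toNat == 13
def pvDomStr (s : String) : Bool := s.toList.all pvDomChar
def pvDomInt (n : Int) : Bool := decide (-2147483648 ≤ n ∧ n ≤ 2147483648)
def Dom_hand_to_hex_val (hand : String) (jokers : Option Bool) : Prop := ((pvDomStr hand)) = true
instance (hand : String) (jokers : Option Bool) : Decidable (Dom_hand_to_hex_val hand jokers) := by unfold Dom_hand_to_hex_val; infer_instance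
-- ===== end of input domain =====

-- B replaces A's Horner shift/or loop by a card-value dict and a positional sum over the
-- reversed hand (alternative decomposition, same cost).

-- ===== PORT A =====
-- one loop step of A; `none` marks the int(card) ValueError (the final getD 0 is never
-- reached on Pre_ inputs)
def handStepA (jokers : Option Bool) (acc : Option Int) (card : Char) : Option Int :=
  match acc with
  | none => none
  | some hex_val =>
    if card = 'T' then some (PySem.Int.bor 0xA (hex_val <<< (4 : Nat)))
    else if card = 'J' then
      -- Python `not jokers`: Option Bool is falsy unless it is `some true`
      if ¬ (jokers = some true) then some (PySem.Int.bor 0xB (hex_val <<< (4 : Nat)))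
      else some (PySem.Int.bor 0x1 (hex_val <<< (4 : Nat)))
    else if card = 'Q' then some (PySem.Int.bor 0xC (hex_val <<< (4 : Nat)))
    else if card = 'K' then some (PySem.Int.bor 0xD (hex_val <<< (4 : Nat)))
    else if card = 'A' then some (PySem.Int.bor 0xE (hex_val <<< (4 : Nat)))
    else
      match PySem.Int.ofStr? (String.mk [card]) with   -- int(card)
      | none => none
      | some d => some (PySem.Int.bor d (hex_val <<< (4 : Nat)))

def hand_to_hex_val (hand : String) (jokers : Option Bool) : Int :=
  (hand.toList.foldl (handStepA jokers) (some 0)).getD 0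

-- ===== PORT B =====
-- `vals[c] if c in vals else int(c)`; the getD 0 is the int(c) ValueError case, outside Pre_
def cardValB (vals : PySem.Dict Char Int) (c : Char) : Int :=
  match PySem.Dict.get? vals c with
  | some v => v
  | none => (PySem.Int.ofStr? (String.mk [c])).getD 0

def hand_to_hex_val_alt (hand : String) (jokers : Option Bool) : Int :=
  let vals : PySem.Dict Char Int :=
    ⟨[('T', 10), ('J', if jokers = some true then 1 else 11), ('Q', 12), ('K', 13), ('A', 14)]⟩
  (PySem.List.enumerate hand.toList.reverse 0).foldl
    (fun acc p => acc + cardValB vals p.2 * 16 ^ p.1.toNat) 0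

-- ===== PRECONDITION & SPEC =====
def pvCards : List Char := ['0','1','2','3','4','5','6','7','8','9','T','J','Q','K','A']

-- A raises ValueError (int(card)) on any other character, so those hands are excluded
def Pre_hand_to_hex_val (hand : String) (jokers : Option Bool) : Prop :=
  hand.toList.all (fun c => pvCards.contains c) = true
instance (hand : String) (jokers : Option Bool) : Decidable (Pre_hand_to_hex_val hand jokers) := by unfold Pre_hand_to_hex_val; infer_instance

def pvWitness_hand_to_hex_val : String × Option Bool := ("KTJJT", some true)

def Spec_hand_to_hex_val (hand : String) (jokers : Option Bool) (out : Int) : Prop := out = hand_to_hex_val_alt hand jokers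
instance (hand : String) (jokers : Option Bool) (out : Int) : Decidable (Spec_hand_to_hex_val hand jokers out) := by unfold Spec_hand_to_hex_val; infer_instance

-- ===== CLAIM (what is proved, stated in full; the proofs are below) =====
def Claim_equal_hand_to_hex_val : Prop := ∀ (hand : String) (jokers : Option Bool), Dom_hand_to_hex_val hand jokers → Pre_hand_to_hex_val hand jokers → Spec_hand_to_hex_val hand jokers (hand_to_hex_val hand jokers)

-- ===== LEMMAS AND PROOFS =====

-- the digit value of one card
def dval (jokers : Option Bool) (c : Char) : Int :=
  if c = 'T' then 10
  else if c = 'J' then (if jokers = some true then 1 else 11)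
  else if c = 'Q' then 12
  else if c = 'K' then 13
  else if c = 'A' then 14
  else (c.toNat : Int) - 48

-- reference value of a hand: most significant card first
def vlist (jokers : Option Bool) : List Char → Int
  | [] => 0
  | c :: r => dval jokers c * 16 ^ r.length + vlist jokers r

theorem dval_nonneg {jokers : Option Bool} {c : Char} (hc : c ∈ pvCards) :
    0 ≤ dval jokers c := by
  fin_cases hc <;> simp [dval] <;> (try split_ifs) <;> norm_num

theorem bor_shift (a : Int) (ha : 0 ≤ a) (d : Int) (hd0 : 0 ≤ d) (hd : d < 16) :
    PySem.Int.bor d (a <<< (4 : Nat)) = 16 * a + d := by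
  obtain ⟨m, rfl⟩ := Int.eq_ofNat_of_zero_le ha
  obtain ⟨k, rfl⟩ := Int.eq_ofNat_of_zero_le hd0
  rw [Int.shiftLeft_eq, PySem.Int.bor_of_nonneg (by positivity) (by positivity)]
  have hk : k < 2 ^ 4 := by exact_mod_cast hd
  have h2 := Nat.shiftLeft_add_eq_or_of_lt (b := k) (i := 4) hk m
  have h3 : ((m : Int) * 2 ^ 4).toNat = m <<< 4 := by
    rw [Nat.shiftLeft_eq]; push_cast [Int.toNat_natCast]; omega
  rw [Int.toNat_natCast, h3, Nat.lor_comm, ← h2, Nat.shiftLeft_eq]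
  push_cast; ring

theorem stepA_eq (jokers : Option Bool) (a : Int) (ha : 0 ≤ a) {c : Char}
    (hc : c ∈ pvCards) :
    handStepA jokers (some a) c = some (16 * a + dval jokers c) := by
  fin_cases hc <;>
    simp [handStepA, dval, bor_shift a ha,
      show PySem.Int.ofStr? (String.mk ['0']) = some 0 from by decide,
      show PySem.Int.ofStr? (String.mk ['1']) = some 1 from by decide,
      show PySem.Int.ofStr? (String.mk ['2']) = some 2 from by decide,
      show PySem.Int.ofStr? (String.mk ['3']) = some 3 from by decide,
      show PySem.Int.ofStr? (String.mk ['4']) = some 4 from by decide,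
      show PySem.Int.ofStr? (String.mk ['5']) = some 5 from by decide,
      show PySem.Int.ofStr? (String.mk ['6']) = some 6 from by decide,
      show PySem.Int.ofStr? (String.mk ['7']) = some 7 from by decide,
      show PySem.Int.ofStr? (String.mk ['8']) = some 8 from by decide,
      show PySem.Int.ofStr? (String.mk ['9']) = some 9 from by decide] <;>
    (try norm_num) <;> (try (split_ifs <;> simp))

theorem cardValB_eq (jokers : Option Bool) {c : Char} (hc : c ∈ pvCards) :
    cardValB ⟨[('T', 10), ('J', if jokers = some true then 1 else 11), ('Q', 12), ('K', 13), ('A', 14)]⟩ c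
      = dval jokers c := by
  fin_cases hc <;>
    simp [cardValB, dval, PySem.Dict.get?,
      show PySem.Int.ofStr? (String.mk ['0']) = some 0 from by decide,
      show PySem.Int.ofStr? (String.mk ['1']) = some 1 from by decide,
      show PySem.Int.ofStr? (String.mk ['2']) = some 2 from by decide,
      show PySem.Int.ofStr? (String.mk ['3']) = some 3 from by decide,
      show PySem.Int.ofStr? (String.mk ['4']) = some 4 from by decide,
      show PySem.Int.ofStr? (String.mk ['5']) = some 5 from by decide,
      show PySem.Int.ofStr? (String.mk ['6']) = some 6 from by decide,
      show PySem.Int.ofStr? (String.mk ['7']) = some 7 from by decide,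
      show PySem.Int.ofStr? (String.mk ['8']) = some 8 from by decide,
      show PySem.Int.ofStr? (String.mk ['9']) = some 9 from by decide]

theorem foldA_eq (jokers : Option Bool) :
    ∀ (l : List Char) (a : Int), 0 ≤ a → (∀ c ∈ l, c ∈ pvCards) →
      l.foldl (handStepA jokers) (some a) = some (a * 16 ^ l.length + vlist jokers l) := by
  intro l
  induction l with
  | nil => intro a _ _; simp [vlist]
  | cons c r ih =>
    intro a ha hall
    have hc : c ∈ pvCards := hall c (by simp)
    have hd := dval_nonneg (jokers := jokers) hc
    rw [List.foldl_cons, stepA_eq jokers a ha hc,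
        ih _ (by positivity) (fun x hx => hall x (by simp [hx]))]
    congr 1
    simp [vlist]
    ring

theorem foldB_eq (jokers : Option Bool) :
    ∀ (l : List Char) (a : Int), (∀ c ∈ l, c ∈ pvCards) →
      (PySem.List.enumerate l.reverse 0).foldl
        (fun acc p => acc + cardValB ⟨[('T', 10), ('J', if jokers = some true then 1 else 11), ('Q', 12), ('K', 13), ('A', 14)]⟩ p.2 * 16 ^ p.1.toNat) a
        = a + vlist jokers l := by
  intro l
  induction l with
  | nil => intro a _; simp [vlist]
  | cons c r ih =>
    intro a hall
    have hc : c ∈ pvCards := hall c (by simp)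
    rw [List.reverse_cons, PySem.List.enumerate_append, List.foldl_append,
        ih _ (fun x hx => hall x (by simp [hx]))]
    simp [PySem.List.enumerate, vlist, cardValB_eq jokers hc]
    ring

-- ===== VERDICT (by name: the statement is the Claim_ definition above) =====
theorem hand_to_hex_val_spec : Claim_equal_hand_to_hex_val := by
  intro hand jokers _ hpre
  have hpre' : ∀ c ∈ hand.toList, c ∈ pvCards := by
    unfold Pre_hand_to_hex_val at hpre
    simpa [List.all_eq_true] using hpre
  unfold Spec_hand_to_hex_val hand_to_hex_val hand_to_hex_val_alt
  rw [foldA_eq jokers hand.toList 0 le_rfl hpre']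
  rw [foldB_eq jokers hand.toList 0 hpre']
  simp
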